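-- pv_equiv track=rewrite | github.com/dongchandev/algorithm | 프로그래머스/2/138476. 귤 고르기/귤 고르기.py | solution
-- ===== SOURCE A (Python) =====
-- def solution(k, tangerine):
--     dict = {}
--     for t in tangerine:
--         if t in dict:
--             dict[t] += 1
--         else:
--             dict[t] = 1
--     tangerine.sort(key = lambda x: (-dict[x] , x))
--     return len(set(tangerine[:k]))
-- ===== SOURCE B (Python) =====
-- def solution(k, tangerine):
--     counts = {}
--     for t in tangerine:
--         counts[t] = counts.get(t, 0) + 1
--     acc = 0
--     types = 0
--     for c in sorted(counts.values(), reverse=True):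
--         if acc >= k:
--             break
--         acc += c
--         types += 1
--     return types
-- ===== Notes on version B (the rewrite author's own statement) =====
-- stated objective: faster
-- what changed: B counts frequencies once and greedily accumulates the distinct counts sorted in descending order until k is reached, instead of sorting the whole list by (-count, value) and deduplicating a k-prefix.
-- outside the precondition, e.g. on solution(-1, [1, 2]): A returns 1, B returns 0
import Mathlib
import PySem

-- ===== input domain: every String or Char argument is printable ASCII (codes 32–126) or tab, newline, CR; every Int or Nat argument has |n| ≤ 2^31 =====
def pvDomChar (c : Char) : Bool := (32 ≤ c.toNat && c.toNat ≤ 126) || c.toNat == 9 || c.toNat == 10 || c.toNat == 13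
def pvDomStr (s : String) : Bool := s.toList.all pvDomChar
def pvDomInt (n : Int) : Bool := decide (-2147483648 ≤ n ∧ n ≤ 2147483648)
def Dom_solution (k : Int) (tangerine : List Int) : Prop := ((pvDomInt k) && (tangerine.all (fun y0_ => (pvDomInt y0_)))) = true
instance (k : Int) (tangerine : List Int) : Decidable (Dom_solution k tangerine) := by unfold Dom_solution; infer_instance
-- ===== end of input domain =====

-- B sorts only the distinct frequency counts and accumulates them greedily instead of sorting the
-- whole list and deduplicating a prefix. A sorts `tangerine` in place (a caller-visible mutation
-- B does not perform); the equivalence proved here is about the return value only.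

-- ===== PORT A =====
def solution (k : Int) (tangerine : List Int) : Int :=
  let d := tangerine.foldl
    (fun d t => if d.contains t then d.insert t (d.getD t 0 + 1) else d.insert t 1)
    (PySem.Dict.empty : PySem.Dict Int Int)
  -- sort key: lambda x: (-dict[x], x); every x ∈ tangerine is a key of d, so dict[x] = d.getD x 0
  let s := PySem.List.sorted2 tangerine (fun x => -(d.getD x 0)) (fun x => x) false
  ((PySem.Set.ofList (PySem.List.slice s none (some k))).length : Int)

-- ===== PORT B =====
def solution_alt (k : Int) (tangerine : List Int) : Int :=
  let counts := tangerine.foldl (fun d t => d.insert t (d.getD t 0 + 1))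
    (PySem.Dict.empty : PySem.Dict Int Int)
  -- 'for c in sorted(counts.values(), reverse=True): if acc >= k: break; acc += c; types += 1'
  -- (the break is ported as the state-preserving guard of the fold)
  let r := (PySem.List.sorted counts.values (fun c => c) true).foldl
    (fun st c => if k ≤ st.1 then st else (st.1 + c, st.2 + 1)) ((0 : Int), (0 : Int))
  r.2

-- ===== PRECONDITION & SPEC =====
-- Pre_ restricts k to the natural domain of a box count: it excludes negative k, on which A still
-- returns a value, but one that is an accident of Python's negative slicing (tangerine[:k] then
-- keeps all but the last |k| sorted elements), while B's greedy loop naturally fills no box.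
def Pre_solution (k : Int) (tangerine : List Int) : Prop := 0 ≤ k
instance (k : Int) (tangerine : List Int) : Decidable (Pre_solution k tangerine) := by unfold Pre_solution; infer_instance
def pvWitness_solution : Int × List Int := (2, [1, 2, 2])
def Spec_solution (k : Int) (tangerine : List Int) (out : Int) : Prop := out = solution_alt k tangerine
instance (k : Int) (tangerine : List Int) (out : Int) : Decidable (Spec_solution k tangerine out) := by unfold Spec_solution; infer_instance

-- ===== CLAIM (what is proved, stated in full; the proofs are below) =====
def Claim_equal_solution : Prop := ∀ (k : Int) (tangerine : List Int), Dom_solution k tangerine → Pre_solution k tangerine → Spec_solution k tangerine (solution k tangerine)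

-- ===== LEMMAS AND PROOFS =====

/-- The count of `v` in `tangerine`, as the Int both dicts store. -/
def pvCnt (tangerine : List Int) (v : Int) : Int := (tangerine.count v : Int)

/-- A's sort key `(-dict[x], x)` as a single lexicographic key. -/
def pvKey (tangerine : List Int) (x : Int) : Int ×ₗ Int := toLex (-(pvCnt tangerine x), x)

/-- One step of B's greedy loop. -/
def pvStep (k : Int) (st : Int × Int) (c : Int) : Int × Int :=
  if k ≤ st.1 then st else (st.1 + c, st.2 + 1)

lemma dict_eq (tg : List Int) :
    tg.foldl (fun d t => if d.contains t then d.insert t (d.getD t 0 + 1) else d.insert t 1)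
      (PySem.Dict.empty : PySem.Dict Int Int)
    = tg.foldl (fun d t => d.insert t (d.getD t 0 + 1)) PySem.Dict.empty := by
  have h : (fun (d : PySem.Dict Int Int) t =>
        if d.contains t then d.insert t (d.getD t 0 + 1) else d.insert t 1)
      = fun d t => d.insert t (d.getD t 0 + 1) := by
    funext d t
    by_cases hc : d.contains t
    · simp [hc]
    · have hc' : d.contains t = false := by simpa using hc
      simp [hc', PySem.Dict.getD_of_not_contains d 0 hc']
  rw [h]

lemma getD_cnt (tg : List Int) (v : Int) :
    (tg.foldl (fun d t => d.insert t (d.getD t 0 + 1))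
      (PySem.Dict.empty : PySem.Dict Int Int)).getD v 0 = pvCnt tg v := by
  rw [PySem.Dict.getD_foldl_insert_add_one]
  simp [pvCnt, PySem.Dict.getD_empty]

lemma sorted2_eq_sorted_lex (xs : List Int) (k1 k2 : Int → Int) :
    PySem.List.sorted2 xs k1 k2 false
      = PySem.List.sorted xs (fun x => (toLex (k1 x, k2 x) : Int ×ₗ Int)) false := by
  unfold PySem.List.sorted2 PySem.List.sorted
  simp only [Bool.false_eq_true, if_false]
  have hb : (fun (a b : Int) => decide (k1 a < k1 b) || (!decide (k1 b < k1 a) && decide (k2 a < k2 b)))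
      = fun (a b : Int) => decide ((toLex (k1 a, k2 a) : Int ×ₗ Int) < toLex (k1 b, k2 b)) := by
    funext a b
    by_cases h1 : k1 a < k1 b
    · simp [h1, Prod.Lex.lt_iff]
    · by_cases h2 : k1 b < k1 a
      · have hne : ¬ k1 a = k1 b := fun he => absurd (he ▸ h2) (lt_irrefl _)
        simp [h1, h2, hne, Prod.Lex.lt_iff]
      · have he : k1 a = k1 b := le_antisymm (not_lt.mp h2) (not_lt.mp h1)
        simp [he, Prod.Lex.lt_iff]
  rw [hb]

lemma key_inj (tg : List Int) : Function.Injective (pvKey tg) := by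
  intro a b h
  have h2 := congrArg (fun p : Int ×ₗ Int => (ofLex p).2) h
  simpa [pvKey] using h2

lemma count_flatMap_replicate (c : Int → Nat) (a : Int) :
    ∀ (vs : List Int), vs.Nodup →
      (vs.flatMap (fun v => List.replicate (c v) v)).count a = if a ∈ vs then c a else 0 := by
  intro vs
  induction vs with
  | nil => simp
  | cons v vs ih =>
    intro hnd
    rcases List.nodup_cons.mp hnd with ⟨hv, hnd'⟩
    rw [List.flatMap_cons, List.count_append, List.count_replicate, ih hnd']
    by_cases hav : a = v
    · subst hav
      simp [hv]
    · simp [hav, Ne.symm hav, List.mem_cons]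

lemma pairwise_le_flatMap (key : Int → Int ×ₗ Int) (c : Int → Nat) :
    ∀ (vs : List Int), vs.Pairwise (fun a b => key a < key b) →
      (vs.flatMap (fun v => List.replicate (c v) v)).Pairwise (fun a b => key a ≤ key b) := by
  intro vs
  induction vs with
  | nil => simp
  | cons v vs ih =>
    intro hpw
    rcases List.pairwise_cons.mp hpw with ⟨hhd, htl⟩
    rw [List.flatMap_cons, List.pairwise_append]
    refine ⟨List.pairwise_replicate.mpr (Or.inr le_rfl), ih htl, ?_⟩
    intro a ha b hb
    have hav : a = v := List.eq_of_mem_replicate ha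
    rcases List.mem_flatMap.mp hb with ⟨w, hw, hbw⟩
    have hbw' : b = w := List.eq_of_mem_replicate hbw
    subst hav; subst hbw'
    exact le_of_lt (hhd _ hw)

lemma setOfList_length (xs : List Int) :
    ((PySem.Set.ofList xs).length : Int) = (xs.toFinset.card : Int) := by
  rw [← List.toFinset_card_of_nodup (PySem.Set.nodup_ofList xs)]
  congr 2
  ext a
  simp [PySem.Set.mem_ofList]

lemma foldl_step_stay (k : Int) :
    ∀ (l : List Int) (st : Int × Int), k ≤ st.1 → l.foldl (pvStep k) st = st := by
  intro l
  induction l with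
  | nil => intro st _; rfl
  | cons c l ih =>
    intro st hst
    simp only [List.foldl_cons, pvStep, if_pos hst]
    exact ih st hst

lemma foldl_step_shift (l : List Int) :
    ∀ (k a t : Int),
      l.foldl (pvStep k) (a, t)
        = ((l.foldl (pvStep (k - a)) (0, 0)).1 + a, (l.foldl (pvStep (k - a)) (0, 0)).2 + t) := by
  induction l with
  | nil => intro k a t; simp
  | cons c l ih =>
    intro k a t
    simp only [List.foldl_cons]
    by_cases hk : k ≤ a
    · rw [show pvStep k (a, t) c = (a, t) by simp [pvStep, hk]]
      rw [show pvStep (k - a) ((0 : Int), (0 : Int)) c = (0, 0) by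
        simp only [pvStep]; rw [if_pos (by omega)]]

      exact ih k a t
    · rw [show pvStep k (a, t) c = (a + c, t + 1) by simp [pvStep, hk]]
      rw [show pvStep (k - a) ((0 : Int), (0 : Int)) c = (c, 1) by
        simp only [pvStep]; rw [if_neg (by omega)]; norm_num]
      rw [ih k (a + c) (t + 1), ih (k - a) c 1]
      have he : k - (a + c) = k - a - c := by ring
      rw [he]
      simp only [Prod.mk.injEq]
      constructor <;> ring

lemma greedy (c : Int → Nat) :
    ∀ (vs : List Int), vs.Nodup → (∀ v ∈ vs, 0 < c v) → ∀ (k : Int), 0 ≤ k →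
      (((vs.flatMap (fun v => List.replicate (c v) v)).take k.toNat).toFinset.card : Int)
        = ((vs.map (fun v => (c v : Int))).foldl (pvStep k) (0, 0)).2 := by
  intro vs
  induction vs with
  | nil => intro _ _ k _; simp
  | cons v vs ih =>
    intro hnd hpos k hk
    rcases List.nodup_cons.mp hnd with ⟨hv, hnd'⟩
    have hpos' : ∀ w ∈ vs, 0 < c w := fun w hw => hpos w (List.mem_cons_of_mem v hw)
    have hposv : 0 < c v := hpos v List.mem_cons_self
    by_cases hk0 : k ≤ 0
    · have hk00 : k = 0 := le_antisymm hk0 hk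
      subst hk00
      rw [foldl_step_stay 0 _ _ (le_refl 0)]
      simp
    · rw [List.map_cons, List.foldl_cons,
        show pvStep k ((0 : Int), (0 : Int)) (c v : Int) = ((c v : Int), 1) by
          simp only [pvStep]; rw [if_neg hk0]; norm_num]
      rw [List.flatMap_cons, List.take_append, List.take_replicate, List.length_replicate]
      by_cases hck : k.toNat ≤ c v
      · have hmin : min k.toNat (c v) = k.toNat := min_eq_left hck
        have hsub : k.toNat - c v = 0 := Nat.sub_eq_zero_of_le hck
        rw [hmin, hsub, List.take_zero, List.append_nil]
        rw [foldl_step_stay k _ _ (by show k ≤ ((c v : Nat) : Int); omega)]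
        rw [List.toFinset_replicate_of_ne_zero (by omega : k.toNat ≠ 0)]
        simp
      · have hcvk : c v < k.toNat := lt_of_not_ge hck
        have hmin : min k.toNat (c v) = c v := min_eq_right (le_of_lt hcvk)
        rw [hmin]
        rw [List.toFinset_append, List.toFinset_replicate_of_ne_zero (by omega : c v ≠ 0)]
        have hvnotin : v ∉ ((vs.flatMap fun w => List.replicate (c w) w).take (k.toNat - c v)).toFinset := by
          intro hmem
          rcases List.mem_flatMap.mp (List.mem_of_mem_take (List.mem_toFinset.mp hmem)) with ⟨w, hw, hvw⟩
          exact hv (List.eq_of_mem_replicate hvw ▸ hw)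
        rw [Finset.singleton_union, Finset.card_insert_of_notMem hvnotin]
        rw [foldl_step_shift (vs.map fun w => (c w : Int)) k (c v : Int) 1]
        have hIH := ih hnd' hpos' (k - (c v : Int)) (by omega)
        rw [(by omega : (k - (c v : Int)).toNat = k.toNat - c v)] at hIH
        push_cast
        rw [hIH]

lemma values_eq (tg : List Int) :
    (tg.foldl (fun d t => d.insert t (d.getD t 0 + 1))
      (PySem.Dict.empty : PySem.Dict Int Int)).values
    = (PySem.Set.ofList tg).map (pvCnt tg) := by
  have hkeys : (tg.foldl (fun d t => d.insert t (d.getD t 0 + 1))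
      (PySem.Dict.empty : PySem.Dict Int Int)).keys = PySem.Set.ofList tg := by
    rw [PySem.Dict.keys_foldl_insert tg (fun d x => d.getD x 0 + 1) PySem.Dict.empty]
    rw [PySem.Dict.keys_empty, PySem.Set.update_nil_left]
  have hnd : (tg.foldl (fun d t => d.insert t (d.getD t 0 + 1))
      (PySem.Dict.empty : PySem.Dict Int Int)).keys.Nodup :=
    PySem.Dict.nodup_keys_foldl_insert tg (fun d x => d.getD x 0 + 1) PySem.Dict.empty
      PySem.Dict.nodup_keys_empty
  rw [PySem.Dict.values_eq_map_keys _ hnd 0, hkeys]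
  exact List.map_congr_left (fun v _ => getD_cnt tg v)

-- ===== VERDICT (by name: the statement is the Claim_ definition above) =====
theorem solution_spec : Claim_equal_solution := by
  intro k tg _ hpre
  unfold Spec_solution solution solution_alt
  dsimp only
  rw [dict_eq tg]
  -- both sides now use B's counting dict; name the common data
  have hkeyfun : (fun x => -((tg.foldl (fun d t => d.insert t (d.getD t 0 + 1))
      (PySem.Dict.empty : PySem.Dict Int Int)).getD x 0)) = fun x => -(pvCnt tg x) := by
    funext x; rw [getD_cnt]
  rw [hkeyfun, values_eq tg, sorted2_eq_sorted_lex tg (fun x => -(pvCnt tg x)) (fun x => x)]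
  have hkeylex : (fun x => (toLex (-(pvCnt tg x), x) : Int ×ₗ Int)) = pvKey tg := rfl
  rw [hkeylex]
  -- the distinct values in A's block order
  have hvperm : (PySem.List.sorted (PySem.Set.ofList tg) (pvKey tg)).Perm (PySem.Set.ofList tg) :=
    PySem.List.sorted_perm _ _ _
  set vs := PySem.List.sorted (PySem.Set.ofList tg) (pvKey tg) with hvs
  have hvnd : vs.Nodup := hvperm.nodup_iff.mpr (PySem.Set.nodup_ofList tg)
  have hmemvs : ∀ a, a ∈ vs ↔ a ∈ tg := by
    intro a; rw [hvperm.mem_iff, PySem.Set.mem_ofList]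
  have hvlt : vs.Pairwise (fun a b => pvKey tg a < pvKey tg b) := by
    have hle : vs.Pairwise (fun a b => pvKey tg a ≤ pvKey tg b) :=
      PySem.List.sorted_pairwise _ _
    exact (hvnd.and hle).imp (fun {a b} h =>
      lt_of_le_of_ne h.2 (fun he => h.1 (key_inj tg he)))
  -- A's sorted list is the block decomposition along vs
  have hposc : ∀ v ∈ vs, 0 < tg.count v := fun v hv =>
    List.count_pos_iff.mpr ((hmemvs v).mp hv)
  have hs_ys : PySem.List.sorted tg (pvKey tg)
      = vs.flatMap (fun v => List.replicate (tg.count v) v) := by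
    apply PySem.List.eq_of_perm_of_pairwise_le_of_injective (pvKey tg) (key_inj tg)
    · refine (PySem.List.sorted_perm tg (pvKey tg) false).trans (List.perm_iff_count.mpr ?_).symm
      intro a
      rw [count_flatMap_replicate (fun v => tg.count v) a vs hvnd]
      by_cases ha : a ∈ tg
      · simp [hmemvs, ha]
      · simp [hmemvs, ha, List.count_eq_zero.mpr ha]
    · exact PySem.List.sorted_pairwise _ _
    · exact pairwise_le_flatMap (pvKey tg) (fun v => tg.count v) vs hvlt
  -- B's sorted counts are the block sizes in the same order
  have hcs : PySem.List.sorted ((PySem.Set.ofList tg).map (pvCnt tg)) (fun c => c) true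
      = vs.map (pvCnt tg) := by
    apply PySem.List.eq_of_perm_of_pairwise_le_of_injective (fun x : Int => -x) neg_injective
    · exact (PySem.List.sorted_perm _ _ _).trans (hvperm.map (pvCnt tg)).symm
    · exact (PySem.List.sorted_pairwise_rev _ _).imp (fun h => neg_le_neg h)
    · rw [List.pairwise_map]
      refine hvlt.imp (fun {a b} h => ?_)
      have h' := Prod.Lex.lt_iff.mp h
      simp only [pvKey, ofLex_toLex] at h'
      show -(pvCnt tg a) ≤ -(pvCnt tg b)
      rcases h' with h1 | ⟨h1, -⟩ <;> omega
  rw [hcs, hs_ys]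
  rw [PySem.List.slice_to _ hpre]
  rw [setOfList_length]
  have hstep : (fun (st : Int × Int) c => if k ≤ st.1 then st else (st.1 + c, st.2 + 1))
      = pvStep k := rfl
  rw [hstep]
  have := greedy (fun v => tg.count v) vs hvnd hposc k hpre
  simpa [pvCnt] using this
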